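-- pv_equiv track=rewrite | github.com/WellingtonNico/codewars | checkered_board.py | checkered_board
-- ===== SOURCE A (Python) =====
-- def checkered_board(n):
--     BLACK_SQUARE = '\u25A1'
--     WHITE_SQUARE = '\u25A0'
--
--     return '\n'.join(
--         # a primeira lista gerada é bem simples, separada por \n
--         [
--             ' '.join(
--                 # as pequenas listas são simples também, basta fazer uma verificação no índice pra saber se condiz com a regra
--                 [
--                     BLACK_SQUARE  if not (lineIndex+squareIndex+n)%2 else WHITE_SQUARE
--                     for squareIndex in range(n)
--                 ]
--             )
--             for lineIndex in range(n)
--         ]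
--     )
-- ===== SOURCE B (Python) =====
-- def checkered_board(n):
--     BLACK_SQUARE = '\u25A1'
--     WHITE_SQUARE = '\u25A0'
--     row_even = ' '.join(BLACK_SQUARE if (j + n) % 2 == 0 else WHITE_SQUARE for j in range(n))
--     row_odd = ' '.join(WHITE_SQUARE if (j + n) % 2 == 0 else BLACK_SQUARE for j in range(n))
--     return '\n'.join(row_even if i % 2 == 0 else row_odd for i in range(n))
-- ===== Notes on version B (the rewrite author's own statement) =====
-- stated objective: alternative
-- what changed: B computes the two alternating row strings once and then selects one of them per line by the line index's parity, instead of recomputing every cell with a per-cell parity test in a nested comprehension.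
import Mathlib
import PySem

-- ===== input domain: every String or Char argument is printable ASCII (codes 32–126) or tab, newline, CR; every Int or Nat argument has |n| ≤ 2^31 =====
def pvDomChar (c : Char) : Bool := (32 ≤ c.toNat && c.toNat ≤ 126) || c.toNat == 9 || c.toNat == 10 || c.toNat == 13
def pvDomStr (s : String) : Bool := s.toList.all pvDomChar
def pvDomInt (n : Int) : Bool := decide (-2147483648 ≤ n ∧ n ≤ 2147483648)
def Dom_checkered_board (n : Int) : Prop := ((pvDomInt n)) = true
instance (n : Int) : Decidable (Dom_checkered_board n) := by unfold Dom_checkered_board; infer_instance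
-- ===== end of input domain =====

-- B precomputes the two alternating row strings once and selects one per line by parity; same value, alternative decomposition (no speed claim).

-- ===== PORT A =====
def checkered_board (n : Int) : String :=
  PySem.Str.join "\n"
    ((PySem.List.pyRange 0 n 1).map (fun lineIndex =>
      PySem.Str.join " "
        ((PySem.List.pyRange 0 n 1).map (fun squareIndex =>
          if ¬ PySem.Int.mod (lineIndex + squareIndex + n) 2 = 0 then "\u25A0" else "\u25A1"))))

-- ===== PORT B =====
def checkered_board_alt (n : Int) : String :=
  let row_even := PySem.Str.join " "
    ((PySem.List.pyRange 0 n 1).map (fun j =>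
      if PySem.Int.mod (j + n) 2 = 0 then "\u25A1" else "\u25A0"))
  let row_odd := PySem.Str.join " "
    ((PySem.List.pyRange 0 n 1).map (fun j =>
      if PySem.Int.mod (j + n) 2 = 0 then "\u25A0" else "\u25A1"))
  PySem.Str.join "\n"
    ((PySem.List.pyRange 0 n 1).map (fun i =>
      if PySem.Int.mod i 2 = 0 then row_even else row_odd))

-- ===== PRECONDITION & SPEC =====
def Spec_checkered_board (n : Int) (out : String) : Prop := out = checkered_board_alt n
instance (n : Int) (out : String) : Decidable (Spec_checkered_board n out) := by unfold Spec_checkered_board; infer_instance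

-- ===== CLAIM (what is proved, stated in full; the proofs are below) =====
def Claim_equal_checkered_board : Prop := ∀ (n : Int), Dom_checkered_board n → Spec_checkered_board n (checkered_board n)

-- ===== LEMMAS AND PROOFS =====

-- A's row for line i equals B's even row (i even) / odd row (i odd)
theorem pv_row_eq (n i : Int) :
    ((PySem.List.pyRange 0 n 1).map (fun squareIndex =>
        if ¬ PySem.Int.mod (i + squareIndex + n) 2 = 0 then "\u25A0" else "\u25A1"))
    = if PySem.Int.mod i 2 = 0 then
        (PySem.List.pyRange 0 n 1).map (fun j =>
          if PySem.Int.mod (j + n) 2 = 0 then "\u25A1" else "\u25A0")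
      else
        (PySem.List.pyRange 0 n 1).map (fun j =>
          if PySem.Int.mod (j + n) 2 = 0 then "\u25A0" else "\u25A1") := by
  have h2 : (0:Int) < 2 := by norm_num
  by_cases hi : PySem.Int.mod i 2 = 0
  all_goals first | rw [if_pos hi] | rw [if_neg hi]
  all_goals
    apply List.map_congr_left
    intro j _
    simp only [PySem.Int.mod_eq_emod_of_pos h2] at hi ⊢
    split_ifs with h1 h3 h3 <;> first | rfl | (exfalso; omega)

-- ===== VERDICT (by name: the statement is the Claim_ definition above) =====
theorem checkered_board_spec : Claim_equal_checkered_board := by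
  intro n _
  unfold Spec_checkered_board checkered_board checkered_board_alt
  simp only []
  congr 1
  apply List.map_congr_left
  intro i _
  rw [pv_row_eq n i]
  by_cases hi : PySem.Int.mod i 2 = 0
  · rw [if_pos hi, if_pos hi]
  · rw [if_neg hi, if_neg hi]
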